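-- pv_equiv track=rewrite | github.com/plageon/MemSifter | utils/session_process.py | construct_history_text
-- ===== SOURCE A (Python) =====
-- def construct_session_text(session_turns):
--     session_text = ""
--     user_id, assistant_id = 0, 0
--     role_id_map = {}
--     for tid, turn in enumerate(session_turns):
--         if turn["role"] == "user":
--             session_text += f'<user{user_id}>{turn["content"]}</user>\n'
--             user_id += 1
--         elif turn["role"] == "assistant":
--             session_text += f'<assistant{assistant_id}>{turn["content"]}</assistant>\n'
--             assistant_id += 1
--         else:
--             role = turn["role"]
--             if role not in role_id_map:
--                 role_id_map[role] = 0
--             session_text += f'<{role}{role_id_map[role]}>{turn["content"]}</{role}>\n'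
--             role_id_map[role] += 1
--     return session_text
--
-- def construct_history_text(sessions, session_dates=None):
--     history_text = ""
--     for sid, session_turns in enumerate(sessions):
--         if session_dates is not None:
--             session_date = session_dates[sid]
--             history_text += f'<session{sid}> <date>{session_date}</date>\n'
--         else:
--             history_text += f'<session{sid}>\n'
--         session_text = construct_session_text(session_turns)
--         history_text += session_text
--         history_text += f'</session>\n'
--     return history_text.strip()
-- ===== SOURCE B (Python) =====
-- def construct_history_text(sessions, session_dates=None):
--     def header(sid):
--         if session_dates is None:
--             return f'<session{sid}>\n'
--         return f'<session{sid}> <date>{session_dates[sid]}</date>\n'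
--
--     def turn_text(turns, j):
--         role = turns[j]["role"]
--         idx = sum(1 for u in turns[:j] if u["role"] == role)
--         return f'<{role}{idx}>{turns[j]["content"]}</{role}>\n'
--
--     return ''.join(
--         header(sid)
--         + ''.join(turn_text(turns, j) for j in range(len(turns)))
--         + '</session>\n'
--         for sid, turns in enumerate(sessions)
--     ).strip()
-- ===== Notes on version B (the rewrite author's own statement) =====
-- stated objective: alternative
-- what changed: Replaces A's stateful single pass (two int counters plus a mutated role dict) by a stateless formulation: each turn's tag index is recomputed as the count of same-role turns in the preceding slice turns[:j], and the result is a join of independently rendered per-session/per-turn pieces; correct because A's counter value at turn j is exactly that prefix count.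
import Mathlib
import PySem

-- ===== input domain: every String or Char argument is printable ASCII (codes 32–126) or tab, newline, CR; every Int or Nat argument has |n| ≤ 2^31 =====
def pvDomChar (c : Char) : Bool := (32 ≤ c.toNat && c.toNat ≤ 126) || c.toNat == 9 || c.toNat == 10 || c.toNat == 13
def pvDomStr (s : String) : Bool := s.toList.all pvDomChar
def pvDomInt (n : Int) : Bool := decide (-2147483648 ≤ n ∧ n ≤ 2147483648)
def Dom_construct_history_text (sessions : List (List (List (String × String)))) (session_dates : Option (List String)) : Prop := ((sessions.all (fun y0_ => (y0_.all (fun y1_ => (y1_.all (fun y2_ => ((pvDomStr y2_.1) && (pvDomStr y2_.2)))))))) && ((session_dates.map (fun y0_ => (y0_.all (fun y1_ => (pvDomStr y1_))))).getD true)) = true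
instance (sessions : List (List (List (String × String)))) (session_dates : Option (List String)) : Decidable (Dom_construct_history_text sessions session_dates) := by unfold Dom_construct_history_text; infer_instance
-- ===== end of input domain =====

-- B is a stateless re-formulation: no counters are maintained; each turn's tag index is
-- recomputed as the count of same-role turns in the preceding slice turns[:j], and the
-- output is a join of independently rendered pieces (objective: alternative, not faster).

-- ===== PORT A =====
-- A's per-turn step; state: (accumulated chars, user_id, assistant_id, role_id_map)
def pvA_step (st : List Char × Int × Int × PySem.Dict String Int)
    (t : List (String × String)) : List Char × Int × Int × PySem.Dict String Int :=
  let d := PySem.Dict.mk t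
  let role := d.getD "role" ""
  let content := d.getD "content" ""
  match st with
  | (acc, uid, aid, rmap) =>
    if role = "user" then
      (acc ++ "<user".toList ++ PySem.Int.toChars uid ++ ">".toList ++ content.toList ++ "</user>\n".toList,
       uid + 1, aid, rmap)
    else if role = "assistant" then
      (acc ++ "<assistant".toList ++ PySem.Int.toChars aid ++ ">".toList ++ content.toList ++ "</assistant>\n".toList,
       uid, aid + 1, rmap)
    else
      let rmap' := if rmap.contains role then rmap else rmap.insert role 0
      let idx := rmap'.getD role 0
      (acc ++ "<".toList ++ role.toList ++ PySem.Int.toChars idx ++ ">".toList ++ content.toList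
         ++ "</".toList ++ role.toList ++ ">\n".toList,
       uid, aid, rmap'.insert role (idx + 1))

def pvA_session (turns : List (List (String × String))) : List Char :=
  (turns.foldl pvA_step ([], 0, 0, PySem.Dict.empty)).1

def construct_history_text (sessions : List (List (List (String × String)))) (session_dates : Option (List String)) : String :=
  String.ofList (PySem.Chars.strip ((PySem.List.enumerate sessions 0).foldl
    (fun acc p =>
      acc ++ (match session_dates with
        | some ds =>
          "<session".toList ++ PySem.Int.toChars p.1 ++ "> <date>".toList
            ++ (PySem.List.pyGetD ds p.1 "").toList ++ "</date>\n".toList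
        | none => "<session".toList ++ PySem.Int.toChars p.1 ++ ">\n".toList)
        ++ pvA_session p.2 ++ "</session>\n".toList) []))

-- ===== PORT B =====
-- header(sid)
def pvB_header (session_dates : Option (List String)) (sid : Int) : List Char :=
  match session_dates with
  | none => "<session".toList ++ PySem.Int.toChars sid ++ ">\n".toList
  | some ds =>
    "<session".toList ++ PySem.Int.toChars sid ++ "> <date>".toList
      ++ (PySem.List.pyGetD ds sid "").toList ++ "</date>\n".toList

-- turn_text(turns, j): idx = sum(1 for u in turns[:j] if u["role"] == role)  (a 0/1 sum = countP)
def pvB_turn (turns : List (List (String × String))) (j : Int) : List Char :=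
  let d := PySem.Dict.mk (PySem.List.pyGetD turns j [])
  let role := d.getD "role" ""
  let idx : Int := ((PySem.List.slice turns none (some j)).countP
      (fun u => (PySem.Dict.mk u).getD "role" "" == role) : Int)
  "<".toList ++ role.toList ++ PySem.Int.toChars idx ++ ">".toList
    ++ (d.getD "content" "").toList ++ "</".toList ++ role.toList ++ ">\n".toList

-- ''.join(turn_text(turns, j) for j in range(len(turns)))
def pvB_session (turns : List (List (String × String))) : List Char :=
  ((PySem.List.pyRange 0 (turns.length : Int) 1).map (fun j => pvB_turn turns j)).flatten

def construct_history_text_alt (sessions : List (List (List (String × String)))) (session_dates : Option (List String)) : String :=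
  String.ofList (PySem.Chars.strip
    (((PySem.List.enumerate sessions 0).map
        (fun p => pvB_header session_dates p.1 ++ pvB_session p.2 ++ "</session>\n".toList)).flatten))

-- ===== PRECONDITION & SPEC =====
-- Pre_ excludes inputs on which A raises: a turn dict missing the "role" or "content"
-- key (KeyError), and session_dates shorter than sessions (IndexError).
def Pre_construct_history_text (sessions : List (List (List (String × String)))) (session_dates : Option (List String)) : Prop :=
  (∀ s ∈ sessions, ∀ t ∈ s, (PySem.Dict.mk t).contains "role" = true ∧ (PySem.Dict.mk t).contains "content" = true) ∧
  (∀ ds, session_dates = some ds → sessions.length ≤ ds.length)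
instance (sessions : List (List (List (String × String)))) (session_dates : Option (List String)) : Decidable (Pre_construct_history_text sessions session_dates) := by unfold Pre_construct_history_text; infer_instance

def pvWitness_construct_history_text : (List (List (List (String × String)))) × Option (List String) :=
  ([[[("role", "user"), ("content", "hi")], [("role", "tool"), ("content", "x")]]], some ["2020"])

def Spec_construct_history_text (sessions : List (List (List (String × String)))) (session_dates : Option (List String)) (out : String) : Prop := out = construct_history_text_alt sessions session_dates
instance (sessions : List (List (List (String × String)))) (session_dates : Option (List String)) (out : String) : Decidable (Spec_construct_history_text sessions session_dates out) := by unfold Spec_construct_history_text; infer_instance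

-- ===== CLAIM (what is proved, stated in full; the proofs are below) =====
def Claim_equal_construct_history_text : Prop := ∀ (sessions : List (List (List (String × String)))) (session_dates : Option (List String)), Dom_construct_history_text sessions session_dates → Pre_construct_history_text sessions session_dates → Spec_construct_history_text sessions session_dates (construct_history_text sessions session_dates)

-- ===== LEMMAS AND PROOFS =====

-- number of turns in p whose role is r (B's prefix count)
def pvCnt (p : List (List (String × String))) (r : String) : Nat :=
  p.countP (fun u => (PySem.Dict.mk u).getD "role" "" == r)

theorem pvCnt_append (p : List (List (String × String))) (t : List (String × String)) (r : String) :
    pvCnt (p ++ [t]) r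
      = pvCnt p r + (if (PySem.Dict.mk t).getD "role" "" = r then 1 else 0) := by
  simp [pvCnt, List.countP_append, List.countP_cons]

theorem pvB_turn_at (pfx rest : List (List (String × String))) (t : List (String × String)) :
    pvB_turn (pfx ++ t :: rest) (pfx.length : Int)
      = ("<".toList ++ ((PySem.Dict.mk t).getD "role" "").toList
          ++ PySem.Int.toChars (pvCnt pfx ((PySem.Dict.mk t).getD "role" "") : Int)
          ++ ">".toList ++ ((PySem.Dict.mk t).getD "content" "").toList
          ++ "</".toList ++ ((PySem.Dict.mk t).getD "role" "").toList ++ ">\n".toList) := by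
  have hget : PySem.List.pyGetD (pfx ++ t :: rest) (pfx.length : Int) ([] : List (String × String)) = t := by
    simp [PySem.List.pyGetD_natCast, List.getD]
  have hsl : PySem.List.slice (pfx ++ t :: rest) none (some (pfx.length : Int)) = pfx := by
    rw [PySem.List.slice_to_natCast]; exact List.take_left
  simp [pvB_turn, hget, hsl, pvCnt]

theorem pv_session_aux (turns : List (List (String × String))) :
    ∀ (rest pfx : List (List (String × String))) (accA : List Char) (uid aid : Int)
      (rmap : PySem.Dict String Int),
      turns = pfx ++ rest →
      uid = (pvCnt pfx "user" : Int) →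
      aid = (pvCnt pfx "assistant" : Int) →
      (∀ r : String, r ≠ "user" → r ≠ "assistant" → rmap.getD r 0 = (pvCnt pfx r : Int)) →
      (rest.foldl pvA_step (accA, uid, aid, rmap)).1
        = accA ++ ((PySem.List.pyRange (pfx.length : Int) (turns.length : Int) 1).map
            (fun j => pvB_turn turns j)).flatten := by
  intro rest
  induction rest with
  | nil =>
    intro pfx accA uid aid rmap hT _ _ _
    subst hT
    simp
  | cons t rest' ih =>
    intro pfx accA uid aid rmap hT hu ha ho
    have hlt : (pfx.length : Int) < (turns.length : Int) := by
      rw [hT]; simp only [List.length_append, List.length_cons]; push_cast; omega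
    rw [List.foldl_cons, PySem.List.pyRange_one_cons hlt]
    have hT' : turns = (pfx ++ [t]) ++ rest' := by simp [hT]
    have hturn := hT ▸ pvB_turn_at pfx rest' t
    by_cases h1 : (PySem.Dict.mk t).getD "role" "" = "user"
    · have step : pvA_step (accA, uid, aid, rmap) t
          = (accA ++ pvB_turn turns (pfx.length : Int), uid + 1, aid, rmap) := by
        rw [hturn]; simp [pvA_step, h1, hu]
      rw [step, ih (pfx ++ [t]) _ _ _ _ hT'
        (by rw [pvCnt_append, h1]; simp [hu])
        (by rw [pvCnt_append, h1]; simp [ha])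
        (by intro r hr1 hr2; rw [pvCnt_append, h1]; simp [Ne.symm hr1, ho r hr1 hr2])]
      simp [List.append_assoc]
    · by_cases h2 : (PySem.Dict.mk t).getD "role" "" = "assistant"
      · have step : pvA_step (accA, uid, aid, rmap) t
            = (accA ++ pvB_turn turns (pfx.length : Int), uid, aid + 1, rmap) := by
          rw [hturn]; simp [pvA_step, h2, ha]
        rw [step, ih (pfx ++ [t]) _ _ _ _ hT'
          (by rw [pvCnt_append, h2]; simp [hu])
          (by rw [pvCnt_append, h2]; simp [ha])
          (by intro r hr1 hr2; rw [pvCnt_append, h2]; simp [Ne.symm hr2, ho r hr1 hr2])]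
        simp [List.append_assoc]
      · have hidx : ((if rmap.contains ((PySem.Dict.mk t).getD "role" "") then rmap
              else rmap.insert ((PySem.Dict.mk t).getD "role" "") 0).getD ((PySem.Dict.mk t).getD "role" "") 0)
            = (pvCnt pfx ((PySem.Dict.mk t).getD "role" "") : Int) := by
          by_cases hc : rmap.contains ((PySem.Dict.mk t).getD "role" "") = true
          · simp [hc, ho _ h1 h2]
          · simp only [Bool.not_eq_true] at hc
            rw [← ho _ h1 h2]
            simp [hc, PySem.Dict.getD_of_not_contains]
        have step : pvA_step (accA, uid, aid, rmap) t
            = (accA ++ pvB_turn turns (pfx.length : Int), uid, aid,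
               (if rmap.contains ((PySem.Dict.mk t).getD "role" "") then rmap
                  else rmap.insert ((PySem.Dict.mk t).getD "role" "") 0).insert
                 ((PySem.Dict.mk t).getD "role" "")
                 ((if rmap.contains ((PySem.Dict.mk t).getD "role" "") then rmap
                     else rmap.insert ((PySem.Dict.mk t).getD "role" "") 0).getD ((PySem.Dict.mk t).getD "role" "") 0 + 1)) := by
          rw [hturn]; simp [pvA_step, h1, h2, hidx]
        rw [step, ih (pfx ++ [t]) _ _ _ _ hT'
          (by rw [pvCnt_append]; simp [h1, hu])
          (by rw [pvCnt_append]; simp [h2, ha])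
          (by
            intro r hr1 hr2
            rw [pvCnt_append]
            by_cases hr : r = (PySem.Dict.mk t).getD "role" ""
            · subst hr
              simp [hidx]
            · by_cases hc : rmap.contains ((PySem.Dict.mk t).getD "role" "") = true <;>
                simp [hc, PySem.Dict.getD_insert, hr, Ne.symm hr, ho r hr1 hr2])]
        simp [List.append_assoc]

theorem pv_session_eq (turns : List (List (String × String))) :
    pvA_session turns = pvB_session turns := by
  have h := pv_session_aux turns turns [] [] 0 0 PySem.Dict.empty (by simp)
    (by simp [pvCnt]) (by simp [pvCnt]) (by intro r _ _; simp [pvCnt])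
  simpa [pvA_session, pvB_session] using h

theorem pv_hist_eq (hdr : Int → List Char)
    (es : List (Int × List (List (String × String)))) :
    es.foldl (fun acc p => acc ++ hdr p.1 ++ pvA_session p.2 ++ "</session>\n".toList) []
      = (es.map (fun p => hdr p.1 ++ pvB_session p.2 ++ "</session>\n".toList)).flatten := by
  induction es using List.reverseRecOn with
  | nil => rfl
  | append_singleton rest e ih =>
    rw [List.foldl_append, List.foldl_cons, List.foldl_nil, ih]
    simp [pv_session_eq, List.append_assoc]

-- ===== VERDICT (by name: the statement is the Claim_ definition above) =====
theorem construct_history_text_spec : Claim_equal_construct_history_text := by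
  intro sessions session_dates _ _
  unfold Spec_construct_history_text construct_history_text construct_history_text_alt
  cases session_dates with
  | none =>
    exact congrArg (fun l => String.ofList (PySem.Chars.strip l))
      (pv_hist_eq (pvB_header none) _)
  | some ds =>
    exact congrArg (fun l => String.ofList (PySem.Chars.strip l))
      (pv_hist_eq (pvB_header (some ds)) _)
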